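-- pv_equiv track=rewrite | github.com/vladiiancu/plex-reshare | rq/tasks/utilities.py | get_common_paths
-- ===== SOURCE A (Python) =====
-- def get_common_paths(paths: list) -> list:
--     common_paths = {}
--
--     for path in paths:
--         path_folders = path.split("/")[:-2]
--
--         while len(path_folders) > 0:
--             p = "/".join(path_folders)
--             if not common_paths.get(p):
--                 common_paths[p] = 1
--             else:
--                 common_paths[p] += 1
--
--             path_folders.pop()
--
--     common_paths = [cp for cp, cpc in common_paths.items() if (cpc * 100) / len(paths) > 25]
--     common_paths.sort(key=lambda cp: len(cp.split("/")), reverse=True)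
--
--     return common_paths
-- ===== SOURCE B (Python) =====
-- def get_common_paths(paths: list) -> list:
--     n = len(paths)
--     tuples = [p.split("/")[:-2] for p in paths]
--     maxd = 0
--     for t in tuples:
--         if maxd < len(t):
--             maxd = len(t)
--     out = []
--     for d in range(1, maxd + 1):
--         pres = ["/".join(t[:d]) for t in tuples if len(t) >= d]
--         block = [pre for pre in dict.fromkeys(pres) if pres.count(pre) * 100 > 25 * n]
--         out = block + out
--     return out
-- ===== Notes on version B (the rewrite author's own statement) =====
-- stated objective: alternative
-- what changed: B eliminates A's global prefix-counter dict and the final stable sort: it iterates over depths, for each depth collects the depth-d prefix of every path, keeps the first-occurrence-deduplicated ones whose multiplicity (list count) clears the 25% threshold, and prepends each level's block so the output comes out deepest-first by construction; the threshold uses the exact integer form c*100 > 25*n instead of float division.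
import Mathlib
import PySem

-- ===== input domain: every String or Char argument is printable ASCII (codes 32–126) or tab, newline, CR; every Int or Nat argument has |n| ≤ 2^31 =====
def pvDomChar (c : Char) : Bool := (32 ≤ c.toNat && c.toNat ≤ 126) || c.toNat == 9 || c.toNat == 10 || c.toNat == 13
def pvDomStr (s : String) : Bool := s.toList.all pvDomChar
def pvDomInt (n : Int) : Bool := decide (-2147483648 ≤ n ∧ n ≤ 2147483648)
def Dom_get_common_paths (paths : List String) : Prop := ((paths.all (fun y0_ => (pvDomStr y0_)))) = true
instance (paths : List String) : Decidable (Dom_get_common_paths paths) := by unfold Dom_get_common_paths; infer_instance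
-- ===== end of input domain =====

-- B replaces A's global prefix-counter dict + final stable sort with a depth-major sweep: each depth's
-- qualifying prefixes are found by per-level list counting and the level blocks are prepended, so the
-- output is deepest-first by construction — objective: alternative (no dict, no sort).

-- ===== PORT A =====
-- 'if not common_paths.get(p): common_paths[p] = 1 else: common_paths[p] += 1'
-- (Python truthiness of dict.get: None and 0 are falsy)
def pvAUpd (d : PySem.Dict String Int) (p : String) : PySem.Dict String Int :=
  match d.get? p with
  | none => d.insert p 1
  | some c => if c = 0 then d.insert p 1 else d.insert p (c + 1)

-- the 'while len(path_folders) > 0' loop (pop() removes the last element)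
def pvALoop (folders : List String) (d : PySem.Dict String Int) : PySem.Dict String Int :=
  if _h : folders.length > 0 then
    pvALoop folders.dropLast (pvAUpd d (PySem.Str.join "/" folders))
  else d
termination_by folders.length
decreasing_by simp [List.length_dropLast]; omega

def get_common_paths (paths : List String) : List String :=
  let d := paths.foldl (fun acc path =>
    pvALoop (PySem.List.slice ((PySem.Str.split? path "/").getD []) none (some (-2))) acc)
    PySem.Dict.empty
  -- A's test '(cpc * 100) / len(paths) > 25' (true division) is ported as the exact integer
  -- comparison 100 * cpc > 25 * len(paths); both sides are far below 2^45 here, so the float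
  -- comparison and the integer one coincide.
  let res := (d.items.filter (fun pc => 100 * pc.2 > 25 * (paths.length : Int))).map (·.1)
  PySem.List.sorted res (fun cp => ((PySem.Str.split? cp "/").getD []).length) true

-- ===== PORT B =====
def get_common_paths_alt (paths : List String) : List String :=
  let n : Int := paths.length
  let tuples := paths.map (fun p => PySem.List.slice ((PySem.Str.split? p "/").getD []) none (some (-2)))
  let maxd : Int := tuples.foldl (fun m t => if m < (t.length : Int) then (t.length : Int) else m) 0
  (PySem.List.pyRange 1 (maxd + 1) 1).foldl (fun out d =>
    let pres := (tuples.filter (fun t => decide (d ≤ (t.length : Int)))).map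
      (fun t => PySem.Str.join "/" (PySem.List.slice t none (some d)))
    -- same exact integer form of the 25% test as Source B
    ((PySem.List.dedup pres).filter (fun pre => decide (100 * (pres.count pre : Int) > 25 * n))) ++ out) []

-- ===== PRECONDITION & SPEC =====
def Spec_get_common_paths (paths : List String) (out : List String) : Prop := out = get_common_paths_alt paths
instance (paths : List String) (out : List String) : Decidable (Spec_get_common_paths paths out) := by unfold Spec_get_common_paths; infer_instance

-- ===== CLAIM (what is proved, stated in full; the proofs are below) =====
def Claim_equal_get_common_paths : Prop := ∀ (paths : List String), Dom_get_common_paths paths → Spec_get_common_paths paths (get_common_paths paths)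

-- ===== LEMMAS AND PROOFS =====

-- abbreviations for the shared data
def pvT (p : String) : List String :=
  PySem.List.slice ((PySem.Str.split? p "/").getD []) none (some (-2))
def pvJ (l : List String) : String := PySem.Str.join "/" l
def pvPl (l : List String) : List String :=
  (List.range l.length).map (fun k => pvJ (l.take (k + 1)))
def pvK (p : String) : List String := (pvPl (pvT p)).reverse
def pvDep (s : String) : Nat := ((PySem.Str.split? s "/").getD []).length
def pvSF (s : String) : Prop := '/' ∉ s.toList

-- ---------- A's inner while loop counts the reversed prefix list ----------
lemma pvPl_snoc (l : List String) (x : String) :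
    pvPl (l ++ [x]) = pvPl l ++ [pvJ (l ++ [x])] := by
  simp only [pvPl, List.length_append, List.length_singleton, List.range_succ, List.map_append,
    List.map_singleton]
  congr 1
  · apply List.map_congr_left
    intro k hk
    rw [List.mem_range] at hk
    congr 1
    rw [List.take_append_of_le_length (by omega)]
  · congr 1
    rw [List.take_of_length_le (by simp)]

lemma pvAUpd_eq : pvAUpd = (fun (d : PySem.Dict String Int) p => d.insert p (d.getD p 0 + 1)) := by
  funext d p
  unfold pvAUpd PySem.Dict.getD
  cases h : d.get? p with
  | none => simp
  | some c =>
      simp only [Option.getD_some]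
      by_cases hc : c = 0 <;> simp [hc]

lemma pvALoop_eq (l : List String) :
    ∀ d, pvALoop l d = (pvPl l).reverse.foldl pvAUpd d := by
  induction l using List.reverseRecOn with
  | nil => intro d; rw [pvALoop.eq_def]; simp [pvPl]
  | append_singleton l x ih =>
      intro d
      rw [pvALoop.eq_def]
      simp only [List.length_append, List.length_singleton, List.dropLast_concat]
      rw [dif_pos (by omega), ih, pvPl_snoc]
      simp [pvJ]

-- A's result, in closed form: filtered deduplicated flat key list, stably sorted by depth
lemma pvA_eq (paths : List String) :
    get_common_paths paths =
      PySem.List.sorted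
        ((PySem.Set.ofList (paths.flatMap pvK)).filter
          (fun k => decide (100 * ((paths.flatMap pvK).count k : Int) > 25 * (paths.length : Int))))
        pvDep true := by
  show PySem.List.sorted
      (((paths.foldl (fun acc path =>
          pvALoop (PySem.List.slice ((PySem.Str.split? path "/").getD []) none (some (-2))) acc)
          PySem.Dict.empty).items.filter
            (fun pc => decide (100 * pc.2 > 25 * (paths.length : Int)))).map (·.1))
      (fun cp => ((PySem.Str.split? cp "/").getD []).length) true = _
  have hstep : (fun (acc : PySem.Dict String Int) path =>
      pvALoop (PySem.List.slice ((PySem.Str.split? path "/").getD []) none (some (-2))) acc)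
      = (fun acc path => (pvK path).foldl (fun d x => d.insert x (d.getD x 0 + 1)) acc) := by
    funext acc path
    rw [pvALoop_eq, pvAUpd_eq]; rfl
  rw [hstep, ← List.foldl_flatMap, PySem.Dict.foldl_insert_getD_add_one_eq_counter,
    PySem.Dict.items_counter, List.filter_map, List.map_map]
  simp only [Function.comp_def, List.map_id_fun', id_eq]
  rfl

-- ---------- splitting on '/' ----------
def pvSplitC : List Char → List (List Char)
  | [] => [[]]
  | c :: rest =>
      if c = '/' then [] :: pvSplitC rest
      else ((c :: (pvSplitC rest).headI) :: (pvSplitC rest).tail)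

lemma pvSplitC_ne_nil (l : List Char) : pvSplitC l ≠ [] := by
  cases l with
  | nil => simp [pvSplitC]
  | cons c rest => simp only [pvSplitC]; split <;> simp

lemma pvSplitC_decomp (l : List Char) : pvSplitC l = (pvSplitC l).headI :: (pvSplitC l).tail := by
  have h := pvSplitC_ne_nil l
  cases hl : pvSplitC l with
  | nil => exact absurd hl h
  | cons a t => simp

lemma pvGo_nil (fuel : Nat) (cur : List Char) (acc : List (List Char)) :
    PySem.Chars.splitOn.go ['/'] (fuel+1) [] cur acc = (cur.reverse :: acc).reverse := by
  rw [PySem.Chars.splitOn.go.eq_def]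

lemma pvGo_slash (fuel : Nat) (rest cur : List Char) (acc : List (List Char)) :
    PySem.Chars.splitOn.go ['/'] (fuel+1) ('/' :: rest) cur acc =
      PySem.Chars.splitOn.go ['/'] fuel rest [] (cur.reverse :: acc) := by
  rw [PySem.Chars.splitOn.go.eq_def]
  simp [List.isPrefixOf]

lemma pvGo_other (fuel : Nat) (c : Char) (rest cur : List Char) (acc : List (List Char)) (hc : c ≠ '/') :
    PySem.Chars.splitOn.go ['/'] (fuel+1) (c :: rest) cur acc =
      PySem.Chars.splitOn.go ['/'] fuel rest (c :: cur) acc := by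
  rw [PySem.Chars.splitOn.go.eq_def]
  simp [List.isPrefixOf, Ne.symm hc]

lemma pvGo_eq : ∀ (fuel : Nat) (l cur acc : _), l.length < fuel →
    PySem.Chars.splitOn.go ['/'] fuel l cur acc =
      acc.reverse ++ (cur.reverse ++ (pvSplitC l).headI) :: (pvSplitC l).tail := by
  intro fuel
  induction fuel with
  | zero => intro l cur acc h; omega
  | succ fuel ih =>
      intro l cur acc h
      cases l with
      | nil =>
          rw [pvGo_nil]
          simp [pvSplitC]
      | cons c rest =>
          by_cases hc : c = '/'
          · subst hc
            rw [pvGo_slash, ih rest [] (cur.reverse :: acc) (by simp at h; omega)]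
            simp [pvSplitC]
            rw [← pvSplitC_decomp rest]
          · rw [pvGo_other fuel c rest cur acc hc,
              ih rest (c :: cur) acc (by simp at h; omega)]
            simp only [pvSplitC, if_neg hc]
            rw [pvSplitC_decomp rest]
            simp

lemma pvSplitOn_eq (s : List Char) : PySem.Chars.splitOn s ['/'] = pvSplitC s := by
  unfold PySem.Chars.splitOn
  rw [pvGo_eq (s.length + 1) s [] [] (by omega)]
  simp [← pvSplitC_decomp]

lemma pvHeadI_mem {α : Type} [Inhabited α] (l : List α) (h : l ≠ []) : l.headI ∈ l := by
  cases l with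
  | nil => exact absurd rfl h
  | cons a t => simp

lemma pvSplitC_sf (s : List Char) : ∀ x ∈ pvSplitC s, '/' ∉ x := by
  induction s with
  | nil =>
      intro x hx
      simp [pvSplitC] at hx
      simp [hx]
  | cons c rest ih =>
      intro x hx
      by_cases hc : c = '/'
      · subst hc
        simp [pvSplitC] at hx
        rcases hx with rfl | hx
        · simp
        · exact ih x hx
      · simp [pvSplitC, hc] at hx
        rcases hx with rfl | hx
        · intro hmem
          rcases List.mem_cons.mp hmem with rfl | hmem
          · exact hc rfl
          · exact ih _ (pvHeadI_mem _ (pvSplitC_ne_nil rest)) hmem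
        · exact ih x (List.mem_of_mem_tail hx)

lemma pvSplitC_append (l r : List Char) (h : '/' ∉ l) :
    pvSplitC (l ++ r) = (l ++ (pvSplitC r).headI) :: (pvSplitC r).tail := by
  induction l with
  | nil => simpa using pvSplitC_decomp r
  | cons c l ih =>
      have hc : c ≠ '/' := by intro hcc; exact h (by simp [hcc])
      have hl : '/' ∉ l := by intro hm; exact h (by simp [hm])
      simp only [List.cons_append, pvSplitC, if_neg hc, ih hl]
      simp

lemma pvSplitC_intercalate : ∀ parts : List (List Char), parts ≠ [] → (∀ x ∈ parts, '/' ∉ x) →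
    pvSplitC (List.intercalate ['/'] parts) = parts := by
  intro parts
  induction parts with
  | nil => intro h _; exact absurd rfl h
  | cons a t ih =>
      intro _ hsf
      cases t with
      | nil =>
          have : List.intercalate ['/'] [a] = a := by simp [List.intercalate]
          rw [this, ← List.append_nil a, pvSplitC_append a [] (hsf a (by simp))]
          simp [pvSplitC]
      | cons b t2 =>
          have hint : List.intercalate ['/'] (a :: b :: t2) = a ++ ('/' :: List.intercalate ['/'] (b :: t2)) := by
            simp [List.intercalate, List.intersperse]
          rw [hint, pvSplitC_append a _ (hsf a (by simp))]
          have : pvSplitC ('/' :: List.intercalate ['/'] (b :: t2)) = [] :: pvSplitC (List.intercalate ['/'] (b :: t2)) := by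
            simp [pvSplitC]
          rw [this, ih (by simp) (fun x hx => hsf x (by simp [hx]))]
          simp

lemma pvSplit?_join (l : List String) (h : l ≠ []) (hsf : ∀ x ∈ l, pvSF x) :
    PySem.Str.split? (pvJ l) "/" = some l := by
  unfold pvJ PySem.Str.join PySem.Str.split? PySem.Chars.split?
  simp only [String.toList_ofList]
  have hsep : ("/" : String).toList = ['/'] := rfl
  rw [hsep]
  simp only [List.isEmpty_cons, Bool.false_eq_true, if_false]
  have hj : PySem.Chars.join ['/'] (l.map String.toList) = List.intercalate ['/'] (l.map String.toList) := rfl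
  rw [hj, pvSplitOn_eq, pvSplitC_intercalate (l.map String.toList) (by simpa using h)
    (by intro x hx; rcases List.mem_map.mp hx with ⟨s, hs, rfl⟩; exact hsf s hs)]
  simp [List.map_map, Function.comp_def, String.ofList_toList]

lemma pvDep_join (l : List String) (h : l ≠ []) (hsf : ∀ x ∈ l, pvSF x) :
    pvDep (pvJ l) = l.length := by
  rw [pvDep, pvSplit?_join l h hsf]
  simp

lemma pvSF_split (p : String) : ∀ x ∈ (PySem.Str.split? p "/").getD [], pvSF x := by
  intro x hx
  unfold PySem.Str.split? PySem.Chars.split? at hx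
  have hsep : ("/" : String).toList = ['/'] := rfl
  rw [hsep] at hx
  simp only [List.isEmpty_cons, Bool.false_eq_true, if_false, Option.map_some, Option.getD_some] at hx
  rw [pvSplitOn_eq] at hx
  rcases List.mem_map.mp hx with ⟨cs, hcs, rfl⟩
  show '/' ∉ (String.ofList cs).toList
  rw [String.toList_ofList]
  exact pvSplitC_sf _ cs hcs

lemma pvSF_T (p : String) : ∀ x ∈ pvT p, pvSF x := by
  intro x hx
  exact pvSF_split p x (PySem.List.mem_of_mem_slice _ none (some (-2)) hx)

-- ---------- per-path depth-d prefix extraction ----------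
lemma pvRangeFilterEq (n d : Nat) (hd : 1 ≤ d) :
    (List.range n).filter (fun k => decide (k + 1 = d)) = if d ≤ n then [d - 1] else [] := by
  induction n with
  | zero => simp; omega
  | succ n ih =>
      rw [List.range_succ, List.filter_append, ih]
      by_cases h1 : d ≤ n
      · rw [if_pos h1, if_pos (by omega)]
        have : ¬ (n + 1 = d) := by omega
        simp [this]
      · rw [if_neg h1]
        by_cases h2 : n + 1 = d
        · rw [if_pos (by omega)]
          simp [h2]
          omega
        · rw [if_neg (by omega)]
          simp [h2]

lemma pvK_filter_dep (l : List String) (hsf : ∀ x ∈ l, pvSF x) (d : Nat) (hd : 1 ≤ d) :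
    ((pvPl l).reverse).filter (fun k => decide (pvDep k = d)) =
      if d ≤ l.length then [pvJ (l.take d)] else [] := by
  rw [List.filter_reverse, pvPl, List.filter_map]
  have hcong : ∀ k ∈ List.range l.length,
      ((fun s => decide (pvDep s = d)) ∘ (fun k => pvJ (l.take (k + 1)))) k
        = decide (k + 1 = d) := by
    intro k hk
    rw [List.mem_range] at hk
    have hne : l.take (k + 1) ≠ [] := by
      have : (l.take (k + 1)).length = k + 1 := by
        rw [List.length_take]; omega
      intro hc; rw [hc] at this; simp at this
    have := pvDep_join (l.take (k + 1)) hne (fun x hx => hsf x (List.mem_of_mem_take hx))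
    simp only [Function.comp_apply, this, List.length_take]
    have : min (k + 1) l.length = k + 1 := by omega
    rw [this]
  rw [List.filter_congr hcong, pvRangeFilterEq l.length d hd]
  by_cases h : d ≤ l.length
  · rw [if_pos h, if_pos h]
    have : d - 1 + 1 = d := by omega
    simp [this]
  · rw [if_neg h, if_neg h]
    simp

-- ---------- dedup commutes with filter ----------
lemma pvFilter_add_pos (p : String → Bool) (s : PySem.Set String) (a : String) (hp : p a = true) :
    (PySem.Set.add s a).filter p = PySem.Set.add (s.filter p) a := by
  unfold PySem.Set.add
  have hc : ∀ (u : List String), PySem.Set.contains u a = decide (a ∈ u) := by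
    intro u; simp [PySem.Set.contains]
  by_cases hm : a ∈ s
  · rw [hc, if_pos (by simpa using hm), hc, if_pos (by simp [List.mem_filter, hm, hp])]
  · rw [hc, if_neg (by simpa using hm), hc,
      if_neg (by simp [List.mem_filter, hm]), List.filter_append]
    simp [hp]

lemma pvFilter_add_neg (p : String → Bool) (s : PySem.Set String) (a : String) (hp : p a = false) :
    (PySem.Set.add s a).filter p = s.filter p := by
  unfold PySem.Set.add
  split
  · rfl
  · rw [List.filter_append]; simp [hp]

lemma pvUpdate_filter (p : String → Bool) :
    ∀ (l : List String) (s : PySem.Set String),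
      (PySem.Set.update s l).filter p = PySem.Set.update (s.filter p) (l.filter p) := by
  intro l
  induction l with
  | nil => intro s; rfl
  | cons a t ih =>
      intro s
      show (PySem.Set.update (PySem.Set.add s a) t).filter p = _
      rw [ih]
      by_cases hp : p a
      · rw [pvFilter_add_pos p s a hp]
        simp only [List.filter_cons, hp, if_pos]
        rfl
      · rw [pvFilter_add_neg p s a (by simpa using hp)]
        simp only [List.filter_cons, hp]
        simp

lemma pvOfList_filter (p : String → Bool) (l : List String) :
    (PySem.Set.ofList l).filter p = PySem.Set.ofList (l.filter p) := by
  show (PySem.Set.update PySem.Set.empty l).filter p = _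
  rw [pvUpdate_filter]
  rfl

-- ---------- stable reverse sort = descending buckets ----------
lemma pvInsertBy_cons (b : String → String → Bool) (x y : String) (ys : List String) :
    PySem.List.insertBy b x (y :: ys) = if b x y then x :: y :: ys else y :: PySem.List.insertBy b x ys := by
  rfl

lemma pvInsertBy_section (key : String → Nat) (x : String) (l r : List String)
    (h : ∀ y ∈ l, ¬ key y < key x) :
    PySem.List.insertBy (fun a b => decide (key b < key a)) x (l ++ r) =
      l ++ PySem.List.insertBy (fun a b => decide (key b < key a)) x r := by
  induction l with
  | nil => simp
  | cons y t ih =>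
      rw [List.cons_append, pvInsertBy_cons]
      have : decide (key y < key x) = false := by
        simp [h y (by simp)]
      rw [this]
      simp only [Bool.false_eq_true, if_false, List.cons_append]
      rw [ih (fun z hz => h z (by simp [hz]))]

lemma pvInsertBy_nil (b : String → String → Bool) (x : String) :
    PySem.List.insertBy b x [] = [x] := rfl

lemma pvInsertBy_bucket (key : String → Nat) (x : String) :
    ∀ (D : List Nat) (G : Nat → List String), D.Pairwise (· > ·) → key x ∈ D →
      (∀ v ∈ D, ∀ y ∈ G v, key y = v) →
      PySem.List.insertBy (fun a b => decide (key b < key a)) x (D.flatMap G) =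
        D.flatMap (fun v => G v ++ if key x = v then [x] else []) := by
  intro D
  induction D with
  | nil => intro G _ hx _; simp at hx
  | cons v D' ih =>
      intro G hD hx hG
      have hDlt : ∀ u ∈ D', u < v := (List.pairwise_cons.mp hD).1
      have hD' : D'.Pairwise (· > ·) := (List.pairwise_cons.mp hD).2
      rw [List.flatMap_cons, List.flatMap_cons]
      by_cases hv : key x = v
      · have htail : D'.flatMap (fun u => G u ++ if key x = u then [x] else []) = D'.flatMap G := by
          rw [List.flatMap_def, List.flatMap_def]
          congr 1
          apply List.map_congr_left
          intro u hu
          rw [if_neg (by have := hDlt u hu; omega), List.append_nil]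
        rw [htail, if_pos hv]
        rw [pvInsertBy_section key x (G v) _ (by
          intro y hy
          rw [hG v (by simp) y hy, hv]
          omega)]
        rw [List.append_assoc]
        congr 1
        cases hfm : D'.flatMap G with
        | nil => rw [pvInsertBy_nil]; rfl
        | cons hhd ttl =>
            rw [pvInsertBy_cons]
            have hm : hhd ∈ D'.flatMap G := by rw [hfm]; simp
            rcases List.mem_flatMap.mp hm with ⟨u, hu, hg⟩
            have : key hhd = u := hG u (by simp [hu]) hhd hg
            have hlt : key hhd < key x := by
              rw [this, hv]; exact hDlt u hu
            rw [if_pos (by simpa using hlt)]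
            rfl
      · have hx' : key x ∈ D' := by
          rcases List.mem_cons.mp hx with h | h
          · exact absurd h hv
          · exact h
        have hxlt : key x < v := hDlt _ hx'
        rw [pvInsertBy_section key x (G v) _ (by
          intro y hy
          rw [hG v (by simp) y hy]
          omega)]
        rw [ih G hD' hx' (fun u hu y hy => hG u (by simp [hu]) y hy)]
        rw [if_neg hv, List.append_nil]

lemma pvSorted_bucket (key : String → Nat) (D : List Nat) (hD : D.Pairwise (· > ·))
    (xs : List String) (hx : ∀ x ∈ xs, key x ∈ D) :
    PySem.List.sorted xs key true = D.flatMap (fun v => xs.filter (fun x => decide (key x = v))) := by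
  rw [PySem.List.sorted_rev_eq_foldl_insertBy]
  induction xs using List.reverseRecOn with
  | nil => simp
  | append_singleton xs x ih =>
      rw [List.foldl_append, List.foldl_cons, List.foldl_nil]
      rw [ih (fun y hy => hx y (by simp [hy]))]
      rw [pvInsertBy_bucket key x D
        (fun v => xs.filter (fun y => decide (key y = v))) hD (hx x (by simp))
        (by intro v _ y hy
            simp only [List.mem_filter] at hy
            exact of_decide_eq_true hy.2)]
      rw [List.flatMap_def, List.flatMap_def]
      congr 1
      apply List.map_congr_left
      intro v _
      rw [List.filter_append]
      congr 1
      by_cases hxv : key x = v <;> simp [hxv]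

-- ---------- B's loop shape ----------
lemma pvFoldl_prepend (f : Int → List String) : ∀ (l : List Int) (acc : List String),
    l.foldl (fun acc d => f d ++ acc) acc = (l.reverse).flatMap f ++ acc := by
  intro l
  induction l with
  | nil => intro acc; simp
  | cons d t ih =>
      intro acc
      rw [List.foldl_cons, ih, List.reverse_cons, List.flatMap_append]
      simp

lemma pvRange_desc (M : Nat) :
    PySem.List.pyRange 1 ((M : Int) + 1) 1 = (List.range M).map (fun j : Nat => (j : Int) + 1) := by
  induction M with
  | zero => decide
  | succ M ih =>
      have : ((M + 1 : Nat) : Int) + 1 = (((M : Int) + 1) + 1) := by push_cast; ring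
      rw [this, PySem.List.pyRange_one_succ_right (by omega), ih, List.range_succ,
        List.map_append]
      simp

lemma pvMax_step :
    (fun (m : Int) (t : List String) => if m < (t.length : Int) then (t.length : Int) else m) =
      (fun (m : Int) (t : List String) => max m (t.length : Int)) := by
  funext m t
  by_cases h : m < (t.length : Int)
  · rw [if_pos h, max_eq_right (by omega)]
  · rw [if_neg h, max_eq_left (by omega)]

lemma pvFilterSingleton {α β : Type} (p : α → Bool) (f : α → β) (l : List α) :
    (l.filter p).map f = l.flatMap (fun x => if p x then [f x] else []) := by
  induction l with
  | nil => rfl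
  | cons a t ih =>
      rw [List.filter_cons, List.flatMap_cons, ← ih]
      by_cases hp : p a <;> simp [hp]

-- ---------- per-depth prefix streams ----------
def pvPres (paths : List String) (d : Nat) : List String :=
  paths.flatMap (fun p => if d ≤ (pvT p).length then [pvJ ((pvT p).take d)] else [])

lemma pvFlat_filter (paths : List String) (d : Nat) (hd : 1 ≤ d) :
    (paths.flatMap pvK).filter (fun k => decide (pvDep k = d)) = pvPres paths d := by
  rw [List.filter_flatMap]
  unfold pvPres
  rw [List.flatMap_def, List.flatMap_def]
  congr 1
  apply List.map_congr_left
  intro p _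
  show (pvK p).filter _ = _
  unfold pvK
  rw [pvK_filter_dep (pvT p) (pvSF_T p) d hd]

lemma pvPres_mem (paths : List String) (d : Nat) (k : String) (hd : 1 ≤ d)
    (hk : k ∈ pvPres paths d) : pvDep k = d := by
  unfold pvPres at hk
  rcases List.mem_flatMap.mp hk with ⟨p, _, hm⟩
  by_cases h : d ≤ (pvT p).length
  · rw [if_pos h] at hm
    simp only [List.mem_singleton] at hm
    subst hm
    rw [pvDep_join _ (by
        intro hc
        have h2 : (List.take d (pvT p)).length = 0 := by rw [hc]; rfl
        rw [List.length_take] at h2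
        omega)
      (fun x hx => pvSF_T p x (List.mem_of_mem_take hx))]
    rw [List.length_take]
    omega
  · rw [if_neg h] at hm
    simp at hm

lemma pvBlock (paths : List String) (d : Nat) (hd : 1 ≤ d) :
    ((PySem.Set.ofList (paths.flatMap pvK)).filter
        (fun k => decide (100 * ((paths.flatMap pvK).count k : Int) > 25 * (paths.length : Int)))).filter
      (fun k => decide (pvDep k = d))
    = (PySem.Set.ofList (pvPres paths d)).filter
        (fun k => decide (100 * ((pvPres paths d).count k : Int) > 25 * (paths.length : Int))) := by
  have h1 : ((PySem.Set.ofList (paths.flatMap pvK)).filter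
        (fun k => decide (100 * ((paths.flatMap pvK).count k : Int) > 25 * (paths.length : Int)))).filter
      (fun k => decide (pvDep k = d))
      = ((PySem.Set.ofList (paths.flatMap pvK)).filter (fun k => decide (pvDep k = d))).filter
          (fun k => decide (100 * ((paths.flatMap pvK).count k : Int) > 25 * (paths.length : Int))) := by
    rw [List.filter_filter, List.filter_filter]
    exact List.filter_congr (fun a _ => by rw [Bool.and_comm])
  rw [h1, pvOfList_filter, pvFlat_filter paths d hd]
  apply List.filter_congr
  intro k hk
  have hdep : pvDep k = d := pvPres_mem paths d k hd ((PySem.Set.mem_ofList _ _).mp hk)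
  have hcnt : (paths.flatMap pvK).count k = (pvPres paths d).count k := by
    rw [← pvFlat_filter paths d hd]
    exact (List.count_filter (by simp [hdep])).symm
  rw [hcnt]

lemma pvRes_dep (paths : List String) (M : Nat)
    (hM : ∀ t ∈ paths.map pvT, t.length ≤ M) :
    ∀ k ∈ (PySem.Set.ofList (paths.flatMap pvK)).filter
        (fun k => decide (100 * ((paths.flatMap pvK).count k : Int) > 25 * (paths.length : Int))),
      pvDep k ∈ ((List.range M).map (fun j => j + 1)).reverse := by
  intro k hk
  have hk2 : k ∈ paths.flatMap pvK := (PySem.Set.mem_ofList _ _).mp (List.mem_of_mem_filter hk)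
  rcases List.mem_flatMap.mp hk2 with ⟨p, hp, hkp⟩
  unfold pvK at hkp
  rw [List.mem_reverse] at hkp
  unfold pvPl at hkp
  rcases List.mem_map.mp hkp with ⟨j, hj, rfl⟩
  rw [List.mem_range] at hj
  have hlen : ((pvT p).take (j + 1)).length = j + 1 := by
    rw [List.length_take]; omega
  have hdep : pvDep (pvJ ((pvT p).take (j + 1))) = j + 1 := by
    rw [pvDep_join _ (by
        intro hc
        rw [hc] at hlen
        simp at hlen)
      (fun x hx => pvSF_T p x (List.mem_of_mem_take hx)), hlen]
  rw [hdep]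
  have hjM : j < M := by
    have := hM (pvT p) (List.mem_map_of_mem hp)
    omega
  simp only [List.mem_reverse, List.mem_map, List.mem_range]
  exact ⟨j, hjM, rfl⟩

-- ===== VERDICT (by name: the statement is the Claim_ definition above) =====
theorem get_common_paths_spec : Claim_equal_get_common_paths := by
  intro paths _
  show get_common_paths paths = get_common_paths_alt paths
  rw [pvA_eq]
  simp only [get_common_paths_alt]
  have hT : (fun p => PySem.List.slice ((PySem.Str.split? p "/").getD []) none (some (-2))) = pvT := rfl
  rw [hT, pvMax_step]
  have h0 := (PySem.List.le_foldl_max_int (paths.map pvT) (fun t => ((t.length : Int))) 0).1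
  have hub := (PySem.List.le_foldl_max_int (paths.map pvT) (fun t => ((t.length : Int))) 0).2
  have hcast : (paths.map pvT).foldl (fun m t => max m ((t.length : Int))) 0
      = ((((paths.map pvT).foldl (fun m t => max m ((t.length : Int))) 0).toNat : Nat) : Int) :=
    (Int.toNat_of_nonneg h0).symm
  rw [hcast, pvRange_desc, pvFoldl_prepend, List.append_nil, ← List.map_reverse,
    List.flatMap_map]
  rw [pvSorted_bucket pvDep
    (((List.range (((paths.map pvT).foldl (fun m t => max m ((t.length : Int))) 0).toNat)).map
      (fun j => j + 1)).reverse)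
    (by
      rw [List.pairwise_reverse, List.pairwise_map]
      exact List.pairwise_lt_range.imp (by intro a b h; omega))
    _
    (pvRes_dep paths _ (by
      intro t ht
      have h1 := hub t ht
      omega))]
  rw [← List.map_reverse, List.flatMap_map]
  rw [List.flatMap_def, List.flatMap_def]
  congr 1
  apply List.map_congr_left
  intro j hj
  have hpres : ((paths.map pvT).filter (fun t => decide (((j : Nat) : Int) + 1 ≤ (t.length : Int)))).map
      (fun t => PySem.Str.join "/" (PySem.List.slice t none (some (((j : Nat) : Int) + 1))))
      = pvPres paths (j + 1) := by
    have hb : ((j : Nat) : Int) + 1 = (((j + 1 : Nat)) : Int) := by push_cast; ring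
    rw [hb]
    have hc1 : (fun t : List String => decide ((((j + 1 : Nat)) : Int) ≤ (t.length : Int)))
        = (fun t : List String => decide ((j + 1) ≤ t.length)) := by
      funext t
      rw [decide_eq_decide]
      exact_mod_cast Iff.rfl
    have hc2 : (fun t : List String => PySem.Str.join "/" (PySem.List.slice t none (some (((j + 1 : Nat)) : Int))))
        = (fun t : List String => pvJ (t.take (j + 1))) := by
      funext t
      rw [PySem.List.slice_to_natCast]
      rfl
    rw [hc1, hc2, pvFilterSingleton, List.flatMap_map]
    unfold pvPres
    rw [List.flatMap_def, List.flatMap_def]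
    congr 1
    apply List.map_congr_left
    intro p _
    simp only [decide_eq_true_eq]
  rw [hpres]
  have hdedup : PySem.List.dedup (pvPres paths (j + 1)) = PySem.Set.ofList (pvPres paths (j + 1)) := rfl
  rw [hdedup]
  exact pvBlock paths (j + 1) (by omega)
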